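-- pv_equiv track=rewrite | github.com/AmeetR/coding-in-parallel | src/coding_in_parallel/vcs.py | _normalize_diff
-- ===== SOURCE A (Python) =====
-- def _normalize_diff(diff: str) -> str:
--     lines = diff.splitlines()
--     output: list[str] = []
--     i = 0
--     while i < len(lines):
--         line = lines[i]
--         if line.startswith("diff --git"):
--             output.append(line)
--             parts = line.split()
--             a_path = parts[2]
--             b_path = parts[3]
--             i += 1
--             if i < len(lines) and lines[i].startswith("--- "):
--                 output.append(lines[i])
--                 i += 1
--             else:
--                 output.append(f"--- {a_path}")
--             if i < len(lines) and lines[i].startswith("+++ "):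
--                 output.append(lines[i])
--                 i += 1
--             else:
--                 output.append(f"+++ {b_path}")
--             continue
--         output.append(line)
--         i += 1
--     text = "\n".join(output)
--     if diff.endswith("\n") and not text.endswith("\n"):
--         text += "\n"
--     return text
-- ===== SOURCE B (Python) =====
-- def _normalize_diff(diff: str) -> str:
--     lines = diff.splitlines()
--     # partition: blocks[0] is the preamble, each later block starts with a 'diff --git' line
--     blocks: list[list[str]] = [[]]
--     for line in lines:
--         if line.startswith("diff --git"):
--             blocks.append([line])
--         else:
--             blocks[-1].append(line)
--     out: list[str] = list(blocks[0])
--     for block in blocks[1:]: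
--         header, body = block[0], block[1:]
--         parts = header.split()
--         a_path, b_path = parts[2], parts[3]
--         out.append(header)
--         if body and body[0].startswith("--- "):
--             out.append(body.pop(0))
--         else:
--             out.append(f"--- {a_path}")
--         if body and body[0].startswith("+++ "):
--             out.append(body.pop(0))
--         else:
--             out.append(f"+++ {b_path}")
--         out.extend(body)
--     text = "\n".join(out)
--     if diff.endswith("\n") and not text.endswith("\n"):
--         text += "\n"
--     return text
-- ===== Notes on version B (the rewrite author's own statement) =====
-- stated objective: alternative
-- what changed: Replaced A's index-driven while loop with lookahead cursor arithmetic by a two-phase pass: partition the lines into a preamble plus one block per 'diff --git' header, then repair each block's ---/+++ pair locally and concatenate.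
import Mathlib
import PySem

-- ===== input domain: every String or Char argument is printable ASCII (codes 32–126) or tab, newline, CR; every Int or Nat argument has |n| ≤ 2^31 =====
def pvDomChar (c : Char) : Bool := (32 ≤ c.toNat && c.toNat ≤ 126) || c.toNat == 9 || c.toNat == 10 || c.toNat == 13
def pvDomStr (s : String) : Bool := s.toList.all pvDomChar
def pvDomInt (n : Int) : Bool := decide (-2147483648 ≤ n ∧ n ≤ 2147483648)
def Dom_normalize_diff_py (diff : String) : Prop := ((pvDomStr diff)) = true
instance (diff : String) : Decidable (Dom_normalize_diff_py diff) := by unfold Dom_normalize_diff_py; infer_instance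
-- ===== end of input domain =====

-- B re-decomposes A's index-driven while loop as partition-into-blocks (one block per 'diff --git'
-- header) followed by per-block header repair; objective: alternative decomposition, same cost.
-- Pre_ excludes inputs where a 'diff --git' line has fewer than 4 whitespace-separated words:
-- there Python A raises IndexError (and Python B raises too).

-- ===== PORT A =====
-- A's while loop over the line list, transliterated as recursion on the remaining suffix
def pvLoopA : List String → List String
  | [] => []
  | line :: rest =>
    if PySem.Str.startswith line "diff --git" then
      let parts := PySem.Str.split₀ line
      let a_path := (PySem.List.pyGet? parts 2).getD ""   -- parts[2]; none = IndexError, outside Pre_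
      let b_path := (PySem.List.pyGet? parts 3).getD ""   -- parts[3]
      match rest with
      | [] => [line, "--- " ++ a_path, "+++ " ++ b_path]
      | r1 :: rest2 =>
        if PySem.Str.startswith r1 "--- " then
          match rest2 with
          | [] => [line, r1, "+++ " ++ b_path]
          | r2 :: rest3 =>
            if PySem.Str.startswith r2 "+++ " then line :: r1 :: r2 :: pvLoopA rest3
            else line :: r1 :: ("+++ " ++ b_path) :: pvLoopA (r2 :: rest3)
        else
          line :: ("--- " ++ a_path) ::
            (if PySem.Str.startswith r1 "+++ " then r1 :: pvLoopA rest2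
             else ("+++ " ++ b_path) :: pvLoopA (r1 :: rest2))
    else line :: pvLoopA rest
  termination_by ls => ls.length
  decreasing_by all_goals (simp [List.length_cons]; try omega)

def normalize_diff_py (diff : String) : String :=
  let output := pvLoopA (PySem.Str.splitlines diff)
  let text := PySem.Str.join "\n" output
  if PySem.Str.endswith diff "\n" && !(PySem.Str.endswith text "\n") then text ++ "\n" else text

-- ===== PORT B =====
-- blocks[-1].append(line)
def pvAppendLast : List (List String) → String → List (List String)
  | [], l => [[l]]                      -- unreachable: blocks starts nonempty
  | [b], l => [b ++ [l]]
  | b :: bs, l => b :: pvAppendLast bs l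

def pvStep (blocks : List (List String)) (line : String) : List (List String) :=
  if PySem.Str.startswith line "diff --git" then blocks ++ [[line]]
  else pvAppendLast blocks line

-- emit one block: its header, the repaired ---/+++ pair, then the rest of its body verbatim
def pvEmitBlock : List String → List String
  | [] => []                            -- unreachable: every block carries its header
  | header :: body =>
    let parts := PySem.Str.split₀ header
    let a_path := (PySem.List.pyGet? parts 2).getD ""   -- parts[2]; none = IndexError, outside Pre_
    let b_path := (PySem.List.pyGet? parts 3).getD ""
    match body with
    | [] => [header, "--- " ++ a_path, "+++ " ++ b_path]
    | b1 :: body1 =>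
      if PySem.Str.startswith b1 "--- " then
        match body1 with
        | [] => [header, b1, "+++ " ++ b_path]
        | b2 :: body2 =>
          if PySem.Str.startswith b2 "+++ " then header :: b1 :: b2 :: body2
          else header :: b1 :: ("+++ " ++ b_path) :: b2 :: body2
      else if PySem.Str.startswith b1 "+++ " then
        header :: ("--- " ++ a_path) :: b1 :: body1
      else
        header :: ("--- " ++ a_path) :: ("+++ " ++ b_path) :: b1 :: body1

def normalize_diff_py_alt (diff : String) : String :=
  let blocks := (PySem.Str.splitlines diff).foldl pvStep [[]]
  let out :=
    match blocks with
    | [] => []                          -- unreachable: blocks starts nonempty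
    | pre :: rest => pre ++ rest.flatMap pvEmitBlock
  let text := PySem.Str.join "\n" out
  if PySem.Str.endswith diff "\n" && !(PySem.Str.endswith text "\n") then text ++ "\n" else text

-- ===== PRECONDITION & SPEC =====
-- Pre_ excludes exactly the inputs with a 'diff --git' line of fewer than 4 words, where
-- Python A raises IndexError on parts[2]/parts[3] (and Python B raises there too).
def Pre_normalize_diff_py (diff : String) : Prop :=
  ∀ l ∈ PySem.Str.splitlines diff,
    PySem.Str.startswith l "diff --git" = true → 4 ≤ (PySem.Str.split₀ l).length
instance (diff : String) : Decidable (Pre_normalize_diff_py diff) := by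
  unfold Pre_normalize_diff_py; infer_instance

def pvWitness_normalize_diff_py : String := "diff --git a/x b/y\n@@ -1 +1 @@\n-old\n+new\n"

def Spec_normalize_diff_py (diff : String) (out : String) : Prop := out = normalize_diff_py_alt diff
instance (diff : String) (out : String) : Decidable (Spec_normalize_diff_py diff out) := by unfold Spec_normalize_diff_py; infer_instance

-- ===== CLAIM (what is proved, stated in full; the proofs are below) =====
def Claim_equal_normalize_diff_py : Prop := ∀ (diff : String), Dom_normalize_diff_py diff → Pre_normalize_diff_py diff → Spec_normalize_diff_py diff (normalize_diff_py diff)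

-- ===== LEMMAS AND PROOFS =====

def pvIsDiff (l : String) : Bool := PySem.Str.startswith l "diff --git"

-- recursive characterisation of B's block fold
def pvSplit : List String → List String → List (List String)
  | cur, [] => [cur]
  | cur, l :: ls => if pvIsDiff l then cur :: pvSplit [l] ls else pvSplit (cur ++ [l]) ls

def pvRest (ls : List String) : List (List String) :=
  match ls.dropWhile (fun l => !pvIsDiff l) with
  | [] => []
  | d :: ls' => pvSplit [d] ls'

-- two distinct prefixes of the same string cannot start with different characters
theorem pvPrefix_head {α : Type} (a b : α) (s t u : List α)
    (h1 : (a :: s) <+: u) (h2 : (b :: t) <+: u) : a = b := by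
  obtain ⟨x, hx⟩ := h1
  obtain ⟨y, hy⟩ := h2
  have := hx.trans hy.symm
  simp only [List.cons_append, List.cons.injEq] at this
  exact this.1

theorem pvDiff_not_dash (l : String) (h : pvIsDiff l = true) :
    PySem.Str.startswith l "--- " = false := by
  cases hd : PySem.Str.startswith l "--- " with
  | false => rfl
  | true =>
    have h1 : 'd' :: "iff --git".toList <+: l.toList := by
      have : ("diff --git").toList <+: l.toList := by
        rw [← PySem.Chars.startswith_iff]; simpa [pvIsDiff] using h
      simpa using this
    have h2 : '-' :: "-- ".toList <+: l.toList := by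
      have : ("--- ").toList <+: l.toList := by
        rw [← PySem.Chars.startswith_iff]; simpa using hd
      simpa using this
    have := pvPrefix_head 'd' '-' _ _ l.toList h1 h2
    simp at this

theorem pvDiff_not_plus (l : String) (h : pvIsDiff l = true) :
    PySem.Str.startswith l "+++ " = false := by
  cases hd : PySem.Str.startswith l "+++ " with
  | false => rfl
  | true =>
    have h1 : 'd' :: "iff --git".toList <+: l.toList := by
      have : ("diff --git").toList <+: l.toList := by
        rw [← PySem.Chars.startswith_iff]; simpa [pvIsDiff] using h
      simpa using this
    have h2 : '+' :: "++ ".toList <+: l.toList := by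
      have : ("+++ ").toList <+: l.toList := by
        rw [← PySem.Chars.startswith_iff]; simpa using hd
      simpa using this
    have := pvPrefix_head 'd' '+' _ _ l.toList h1 h2
    simp at this

-- branch-unfolding lemmas for A's loop
theorem pvLoopA_nondiff (l : String) (ls : List String) (h : pvIsDiff l = false) :
    pvLoopA (l :: ls) = l :: pvLoopA ls := by
  unfold pvIsDiff at h
  conv_lhs => rw [pvLoopA.eq_def]
  simp only [h, Bool.false_eq_true, if_false]

theorem pvLoopA_diff_nil (l : String) (hd : PySem.Str.startswith l "diff --git" = true) :
    pvLoopA [l] = [l, "--- " ++ (PySem.List.pyGet? (PySem.Str.split₀ l) 2).getD "",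
      "+++ " ++ (PySem.List.pyGet? (PySem.Str.split₀ l) 3).getD ""] := by
  conv_lhs => rw [pvLoopA.eq_def]
  simp only [hd, if_true]

theorem pvLoopA_dash_nil (l r1 : String)
    (hd : PySem.Str.startswith l "diff --git" = true)
    (h1 : PySem.Str.startswith r1 "--- " = true) :
    pvLoopA [l, r1] = [l, r1, "+++ " ++ (PySem.List.pyGet? (PySem.Str.split₀ l) 3).getD ""] := by
  conv_lhs => rw [pvLoopA.eq_def]
  simp only [hd, h1, if_true]

theorem pvLoopA_dash_plus (l r1 r2 : String) (ls : List String)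
    (hd : PySem.Str.startswith l "diff --git" = true)
    (h1 : PySem.Str.startswith r1 "--- " = true)
    (h2 : PySem.Str.startswith r2 "+++ " = true) :
    pvLoopA (l :: r1 :: r2 :: ls) = l :: r1 :: r2 :: pvLoopA ls := by
  conv_lhs => rw [pvLoopA.eq_def]
  simp only [hd, h1, h2, if_true]

theorem pvLoopA_dash_noplus (l r1 r2 : String) (ls : List String)
    (hd : PySem.Str.startswith l "diff --git" = true)
    (h1 : PySem.Str.startswith r1 "--- " = true)
    (h2 : PySem.Str.startswith r2 "+++ " = false) :
    pvLoopA (l :: r1 :: r2 :: ls) =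
      l :: r1 :: ("+++ " ++ (PySem.List.pyGet? (PySem.Str.split₀ l) 3).getD "") ::
        pvLoopA (r2 :: ls) := by
  conv_lhs => rw [pvLoopA.eq_def]
  simp only [hd, h1, h2, if_true, Bool.false_eq_true, if_false]

theorem pvLoopA_nodash_plus (l r1 : String) (ls : List String)
    (hd : PySem.Str.startswith l "diff --git" = true)
    (h1 : PySem.Str.startswith r1 "--- " = false)
    (h2 : PySem.Str.startswith r1 "+++ " = true) :
    pvLoopA (l :: r1 :: ls) =
      l :: ("--- " ++ (PySem.List.pyGet? (PySem.Str.split₀ l) 2).getD "") :: r1 :: pvLoopA ls := by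
  conv_lhs => rw [pvLoopA.eq_def]
  simp only [hd, h1, h2, if_true, Bool.false_eq_true, if_false]

theorem pvLoopA_nodash_noplus (l r1 : String) (ls : List String)
    (hd : PySem.Str.startswith l "diff --git" = true)
    (h1 : PySem.Str.startswith r1 "--- " = false)
    (h2 : PySem.Str.startswith r1 "+++ " = false) :
    pvLoopA (l :: r1 :: ls) =
      l :: ("--- " ++ (PySem.List.pyGet? (PySem.Str.split₀ l) 2).getD "") ::
        ("+++ " ++ (PySem.List.pyGet? (PySem.Str.split₀ l) 3).getD "") :: pvLoopA (r1 :: ls) := by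
  conv_lhs => rw [pvLoopA.eq_def]
  simp only [hd, h1, h2, Bool.false_eq_true, if_false, if_true]

-- branch-unfolding lemmas for B's block emitter
theorem pvEmit_nil (l : String) :
    pvEmitBlock [l] = [l, "--- " ++ (PySem.List.pyGet? (PySem.Str.split₀ l) 2).getD "",
      "+++ " ++ (PySem.List.pyGet? (PySem.Str.split₀ l) 3).getD ""] := by
  simp only [pvEmitBlock]

theorem pvEmit_dash_nil (l r1 : String) (h1 : PySem.Str.startswith r1 "--- " = true) :
    pvEmitBlock [l, r1] = [l, r1, "+++ " ++ (PySem.List.pyGet? (PySem.Str.split₀ l) 3).getD ""] := by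
  simp only [pvEmitBlock, h1, if_true]

theorem pvEmit_dash_plus (l r1 r2 : String) (body : List String)
    (h1 : PySem.Str.startswith r1 "--- " = true)
    (h2 : PySem.Str.startswith r2 "+++ " = true) :
    pvEmitBlock (l :: r1 :: r2 :: body) = l :: r1 :: r2 :: body := by
  simp only [pvEmitBlock, h1, h2, if_true]

theorem pvEmit_dash_noplus (l r1 r2 : String) (body : List String)
    (h1 : PySem.Str.startswith r1 "--- " = true)
    (h2 : PySem.Str.startswith r2 "+++ " = false) :
    pvEmitBlock (l :: r1 :: r2 :: body) =
      l :: r1 :: ("+++ " ++ (PySem.List.pyGet? (PySem.Str.split₀ l) 3).getD "") :: r2 :: body := by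
  simp only [pvEmitBlock, h1, h2, if_true, Bool.false_eq_true, if_false]

theorem pvEmit_nodash_plus (l r1 : String) (body : List String)
    (h1 : PySem.Str.startswith r1 "--- " = false)
    (h2 : PySem.Str.startswith r1 "+++ " = true) :
    pvEmitBlock (l :: r1 :: body) =
      l :: ("--- " ++ (PySem.List.pyGet? (PySem.Str.split₀ l) 2).getD "") :: r1 :: body := by
  simp only [pvEmitBlock, h1, h2, if_true, Bool.false_eq_true, if_false]

theorem pvEmit_nodash_noplus (l r1 : String) (body : List String)
    (h1 : PySem.Str.startswith r1 "--- " = false)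
    (h2 : PySem.Str.startswith r1 "+++ " = false) :
    pvEmitBlock (l :: r1 :: body) =
      l :: ("--- " ++ (PySem.List.pyGet? (PySem.Str.split₀ l) 2).getD "") ::
        ("+++ " ++ (PySem.List.pyGet? (PySem.Str.split₀ l) 3).getD "") :: r1 :: body := by
  simp only [pvEmitBlock, h1, h2, Bool.false_eq_true, if_false]

theorem pvAppendLast_snoc (front : List (List String)) (cur : List String) (l : String) :
    pvAppendLast (front ++ [cur]) l = front ++ [cur ++ [l]] := by
  induction front with
  | nil => rfl
  | cons b bs ih =>
    cases bs with
    | nil => simp [pvAppendLast]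
    | cons b' bs' => simp [pvAppendLast] at ih ⊢; exact ih

theorem pvFold_split (ls : List String) : ∀ (front : List (List String)) (cur : List String),
    List.foldl pvStep (front ++ [cur]) ls = front ++ pvSplit cur ls := by
  induction ls with
  | nil => intro front cur; simp [pvSplit]
  | cons l ls ih =>
    intro front cur
    rw [List.foldl_cons]
    by_cases h : pvIsDiff l = true
    · have hstep : pvStep (front ++ [cur]) l = (front ++ [cur]) ++ [[l]] := by
        unfold pvStep; unfold pvIsDiff at h; rw [h]; rfl
      rw [hstep, ih]
      simp [pvSplit, h]
    · have h' : pvIsDiff l = false := by simpa using h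
      have hstep : pvStep (front ++ [cur]) l = front ++ [cur ++ [l]] := by
        unfold pvStep; unfold pvIsDiff at h'; rw [h']
        simp [pvAppendLast_snoc]
      rw [hstep, ih]
      simp [pvSplit, h']

theorem pvSplit_char (ls : List String) : ∀ cur : List String,
    pvSplit cur ls = (cur ++ ls.takeWhile (fun l => !pvIsDiff l)) :: pvRest ls := by
  induction ls with
  | nil => intro cur; simp [pvSplit, pvRest]
  | cons l ls ih =>
    intro cur
    by_cases h : pvIsDiff l = true
    · simp [pvSplit, pvRest, h, List.dropWhile_cons]
    · have h' : pvIsDiff l = false := by simpa using h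
      simp [pvSplit, pvRest, h', List.dropWhile_cons, ih]

-- stitching the takeWhile/dropWhile decomposition back through A's loop
theorem pvStitch (ls : List String) :
    ls.takeWhile (fun l => !pvIsDiff l) ++
      (match ls.dropWhile (fun l => !pvIsDiff l) with
        | [] => []
        | d :: t => pvLoopA (d :: t)) = pvLoopA ls := by
  induction ls with
  | nil => simp [pvLoopA]
  | cons l ls ih =>
    by_cases h : pvIsDiff l = true
    · simp [List.takeWhile_cons, List.dropWhile_cons, h]
    · have h' : pvIsDiff l = false := by simpa using h
      simp only [List.takeWhile_cons, List.dropWhile_cons, h', Bool.not_false, if_true,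
        List.cons_append]
      rw [ih, pvLoopA_nondiff l ls h']

theorem pvHead_drop_diff (ls : List String) (d : String) (t : List String)
    (h : ls.dropWhile (fun l => !pvIsDiff l) = d :: t) : pvIsDiff d = true := by
  have hne : ls.dropWhile (fun l => !pvIsDiff l) ≠ [] := by rw [h]; simp
  have h2 := List.head_dropWhile_not (fun l => !pvIsDiff l) hne
  rw [show (ls.dropWhile (fun l => !pvIsDiff l)).head hne = d from by simp [h]] at h2
  simpa using h2

theorem pvEmit_loop (n : Nat) : ∀ (ls : List String) (l : String), ls.length ≤ n →
    pvIsDiff l = true →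
    (pvSplit [l] ls).flatMap pvEmitBlock = pvLoopA (l :: ls) := by
  induction n with
  | zero =>
    intro ls l hlen hd
    have h0 : ls = [] := by
      cases ls with
      | nil => rfl
      | cons a t => simp at hlen
    subst h0
    simp [pvSplit, pvEmit_nil, pvLoopA_diff_nil l hd]
  | succ n ih =>
    intro ls l hlen hd
    rw [pvSplit_char]
    have hR : (pvRest ls).flatMap pvEmitBlock =
        (match ls.dropWhile (fun l => !pvIsDiff l) with
          | [] => []
          | d :: t => pvLoopA (d :: t)) := by
      unfold pvRest
      cases hdw : ls.dropWhile (fun l => !pvIsDiff l) with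
      | nil => simp
      | cons d t =>
        have hdd : pvIsDiff d = true := pvHead_drop_diff ls d t hdw
        have hlt : t.length ≤ n := by
          have hle : (ls.dropWhile (fun l => !pvIsDiff l)).length ≤ ls.length :=
            ls.length_dropWhile_le _
          rw [hdw] at hle; simp at hle; omega
        exact ih t d hlt hdd
    simp only [List.flatMap_cons, List.flatMap_nil, List.singleton_append]
    rw [hR]
    clear hR hlen ih
    have hd' : PySem.Str.startswith l "diff --git" = true := hd
    cases ls with
    | nil =>
      simp [pvEmit_nil, pvLoopA_diff_nil l hd']
    | cons r1 ls2 =>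
      by_cases hr1 : pvIsDiff r1 = true
      · -- the next line is itself a diff header: synthesize both header lines
        have hnd : PySem.Str.startswith r1 "--- " = false := pvDiff_not_dash r1 hr1
        have hnp : PySem.Str.startswith r1 "+++ " = false := pvDiff_not_plus r1 hr1
        simp only [List.takeWhile_cons, List.dropWhile_cons, hr1, Bool.not_true,
          Bool.false_eq_true, if_false, List.append_nil]
        rw [pvEmit_nil, pvLoopA_nodash_noplus l r1 ls2 hd' hnd hnp]
        simp
      · have hr1' : pvIsDiff r1 = false := by simpa using hr1
        simp only [List.takeWhile_cons, List.dropWhile_cons, hr1', Bool.not_false, if_true]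
        by_cases hdash : PySem.Str.startswith r1 "--- " = true
        · cases ls2 with
          | nil =>
            simp only [List.takeWhile_nil, List.dropWhile_nil, List.append_nil]
            rw [pvEmit_dash_nil l r1 hdash, pvLoopA_dash_nil l r1 hd' hdash]
          | cons r2 ls3 =>
            by_cases hr2 : pvIsDiff r2 = true
            · have hnp2 : PySem.Str.startswith r2 "+++ " = false := pvDiff_not_plus r2 hr2
              simp only [List.takeWhile_cons, List.dropWhile_cons, hr2, Bool.not_true,
                Bool.false_eq_true, if_false, List.append_nil]
              rw [pvEmit_dash_nil l r1 hdash, pvLoopA_dash_noplus l r1 r2 ls3 hd' hdash hnp2]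
              simp
            · have hr2' : pvIsDiff r2 = false := by simpa using hr2
              simp only [List.takeWhile_cons, List.dropWhile_cons, hr2', Bool.not_false, if_true]
              by_cases hplus2 : PySem.Str.startswith r2 "+++ " = true
              · rw [pvEmit_dash_plus l r1 r2 _ hdash hplus2,
                  pvLoopA_dash_plus l r1 r2 ls3 hd' hdash hplus2]
                simp only [List.cons_append, List.cons.injEq, true_and]
                exact pvStitch ls3
              · have hplus2' : PySem.Str.startswith r2 "+++ " = false := by simpa using hplus2
                rw [pvEmit_dash_noplus l r1 r2 _ hdash hplus2',
                  pvLoopA_dash_noplus l r1 r2 ls3 hd' hdash hplus2',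
                  pvLoopA_nondiff r2 ls3 hr2']
                simp only [List.cons_append, List.cons.injEq, true_and]
                exact pvStitch ls3
        · have hdash' : PySem.Str.startswith r1 "--- " = false := by simpa using hdash
          by_cases hplus : PySem.Str.startswith r1 "+++ " = true
          · rw [pvEmit_nodash_plus l r1 _ hdash' hplus,
              pvLoopA_nodash_plus l r1 ls2 hd' hdash' hplus]
            simp only [List.cons_append, List.cons.injEq, true_and]
            exact pvStitch ls2
          · have hplus' : PySem.Str.startswith r1 "+++ " = false := by simpa using hplus
            rw [pvEmit_nodash_noplus l r1 _ hdash' hplus',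
              pvLoopA_nodash_noplus l r1 ls2 hd' hdash' hplus',
              pvLoopA_nondiff r1 ls2 hr1']
            simp only [List.cons_append, List.cons.injEq, true_and]
            exact pvStitch ls2

theorem pvRest_flat (ls : List String) :
    (pvRest ls).flatMap pvEmitBlock =
      (match ls.dropWhile (fun l => !pvIsDiff l) with
        | [] => []
        | d :: t => pvLoopA (d :: t)) := by
  unfold pvRest
  cases hdw : ls.dropWhile (fun l => !pvIsDiff l) with
  | nil => simp
  | cons d t => exact pvEmit_loop t.length t d le_rfl (pvHead_drop_diff ls d t hdw)

theorem pvMain (lines : List String) :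
    (match List.foldl pvStep [[]] lines with
      | [] => ([] : List String)
      | pre :: rest => pre ++ rest.flatMap pvEmitBlock) = pvLoopA lines := by
  rw [show ([[]] : List (List String)) = [] ++ [([] : List String)] from rfl]
  rw [pvFold_split lines [] []]
  rw [pvSplit_char]
  simp only [List.nil_append]
  rw [pvRest_flat]
  exact pvStitch lines

-- ===== VERDICT (by name: the statement is the Claim_ definition above) =====
theorem normalize_diff_py_spec : Claim_equal_normalize_diff_py := by
  intro diff _ _
  unfold Spec_normalize_diff_py normalize_diff_py normalize_diff_py_alt
  simp only [pvMain (PySem.Str.splitlines diff)]
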